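-- pv_equiv track=rewrite | github.com/pazhenchira/meta-metacognition | scripts/consistency_audit.py | normalize_app_essence
-- ===== SOURCE A (Python) =====
-- def normalize_app_essence(text: str) -> str:
--     lines = text.splitlines()
--     # Drop generated mirror note if present
--     lines = [line for line in lines if "generated mirror" not in line]
--     # Trim leading blank lines
--     while lines and not lines[0].strip():
--         lines.pop(0)
--     # Normalize blank lines directly after the title
--     if lines and lines[0].startswith("#"):
--         idx = 1
--         while idx < len(lines) and not lines[idx].strip():
--             idx += 1
--         if idx > 2:
--             lines = [lines[0], ""] + lines[idx:]
--     return "\n".join(lines).strip()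
-- ===== SOURCE B (Python) =====
-- def normalize_app_essence(text: str) -> str:
--     out = []
--     state = 0   # 0 = trimming leading blanks, 1 = collapsing blanks after a title, 2 = body
--     run = []    # pending blank lines while in state 1
--     for line in text.splitlines():
--         if "generated mirror" in line:
--             continue
--         if state == 0:
--             if line.strip():
--                 out.append(line)
--                 state = 1 if line.startswith("#") else 2
--         elif state == 1:
--             if line.strip():
--                 out.extend([""] if len(run) > 1 else run)
--                 run = []
--                 out.append(line)
--                 state = 2
--             else:
--                 run.append(line)
--         else:
--             out.append(line)
--     if state == 1:
--         out.extend([""] if len(run) > 1 else run)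
--     return "\n".join(out).strip()
-- ===== Notes on version B (the rewrite author's own statement) =====
-- stated objective: alternative
-- what changed: Replaces A's multi-pass pipeline (filter comprehension, pop-loop trimming leading blanks, an index scan plus list surgery after the title) with a single linear state-machine pass over the lines that emits the output list as it goes, flushing a pending blank-run buffer.
import Mathlib
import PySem

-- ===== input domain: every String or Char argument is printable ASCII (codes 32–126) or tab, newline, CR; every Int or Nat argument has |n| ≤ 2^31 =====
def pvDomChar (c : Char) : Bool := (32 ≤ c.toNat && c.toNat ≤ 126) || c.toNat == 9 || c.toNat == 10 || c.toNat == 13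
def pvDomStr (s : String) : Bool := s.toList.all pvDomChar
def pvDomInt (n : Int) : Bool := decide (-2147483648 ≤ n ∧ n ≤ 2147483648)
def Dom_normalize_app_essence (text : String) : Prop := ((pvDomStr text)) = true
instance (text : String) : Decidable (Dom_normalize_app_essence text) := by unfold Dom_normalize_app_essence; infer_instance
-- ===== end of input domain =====

-- B replaces A's multi-pass pipeline (filter, pop-loop trim, index scan + list surgery)
-- by one linear state-machine pass that emits the output list as it goes (objective: alternative).

-- ===== PORT A =====
-- shared line predicates: 'not line.strip()' and '"generated mirror" not in line'
def pvBlank (l : String) : Bool := PySem.Str.strip l == ""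
def pvKeep (l : String) : Bool := !(PySem.Str.isIn "generated mirror" l)

-- 'while lines and not lines[0].strip(): lines.pop(0)'
def pvPop (lines : List String) : List String :=
  match lines with
  | [] => []
  | l :: ls => if pvBlank l then pvPop ls else l :: ls

-- 'while idx < len(lines) and not lines[idx].strip(): idx += 1'
def pvIdxScan (lines : List String) (idx : Nat) : Nat :=
  if h : idx < lines.length then
    if pvBlank lines[idx] then pvIdxScan lines (idx + 1) else idx
  else idx
termination_by lines.length - idx

def normalize_app_essence (text : String) : String :=
  let lines := (PySem.Str.splitlines text).filter pvKeep
  let lines := pvPop lines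
  let lines :=
    match lines with
    | [] => ([] : List String)
    | l0 :: rest =>
      if PySem.Str.startswith l0 "#" then
        let idx := pvIdxScan (l0 :: rest) 1
        if idx > 2 then [l0, ""] ++ (l0 :: rest).drop idx else l0 :: rest
      else l0 :: rest
  PySem.Str.strip (PySem.Str.join "\n" lines)

-- ===== PORT B =====
-- '[""] if len(run) > 1 else run'
def pvFlush (run : List String) : List String := if run.length > 1 then [""] else run

-- one step of Source B's loop over (out, state, run)
def pvStep (st : List String × Nat × List String) (line : String) : List String × Nat × List String :=
  let (out, state, run) := st
  if !pvKeep line then (out, state, run)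
  else if state == 0 then
    if !pvBlank line then
      (out ++ [line], if PySem.Str.startswith line "#" then 1 else 2, run)
    else (out, state, run)
  else if state == 1 then
    if !pvBlank line then (out ++ pvFlush run ++ [line], 2, [])
    else (out, state, run ++ [line])
  else (out ++ [line], state, run)

def normalize_app_essence_alt (text : String) : String :=
  let st := (PySem.Str.splitlines text).foldl pvStep ([], 0, [])
  let out := if st.2.1 == 1 then st.1 ++ pvFlush st.2.2 else st.1
  PySem.Str.strip (PySem.Str.join "\n" out)

-- ===== PRECONDITION & SPEC =====
def Spec_normalize_app_essence (text : String) (out : String) : Prop := out = normalize_app_essence_alt text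
instance (text : String) (out : String) : Decidable (Spec_normalize_app_essence text out) := by unfold Spec_normalize_app_essence; infer_instance

-- ===== CLAIM (what is proved, stated in full; the proofs are below) =====
def Claim_equal_normalize_app_essence : Prop := ∀ (text : String), Dom_normalize_app_essence text → Spec_normalize_app_essence text (normalize_app_essence text)

-- ===== LEMMAS AND PROOFS =====

-- final flush of Source B, as a function of the fold state
def pvFin (st : List String × Nat × List String) : List String :=
  if st.2.1 == 1 then st.1 ++ pvFlush st.2.2 else st.1

-- what B emits from state 1 with pending run, over the remaining (kept) lines
def pvPost (run : List String) : List String → List String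
  | [] => pvFlush run
  | x :: xs => if pvBlank x then pvPost (run ++ [x]) xs else pvFlush run ++ x :: xs

-- A's title branch, on the popped list
def pvACore : List String → List String
  | [] => []
  | l0 :: rest => if PySem.Str.startswith l0 "#" then l0 :: pvPost [] rest else l0 :: rest

theorem pvStep_skip (st : List String × Nat × List String) (line : String)
    (h : pvKeep line = false) : pvStep st line = st := by
  obtain ⟨o, s, r⟩ := st; simp [pvStep, h]

theorem pvFoldl_filter (L : List String) (st : List String × Nat × List String) :
    L.foldl pvStep st = (L.filter pvKeep).foldl pvStep st := by
  induction L generalizing st with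
  | nil => rfl
  | cons x xs ih =>
    by_cases h : pvKeep x = true
    · simp [h, List.foldl_cons, ih]
    · simp only [Bool.not_eq_true] at h
      simp [h, List.foldl_cons, pvStep_skip _ _ h, ih]

theorem pvFold2 (M : List String) (out run : List String)
    (hM : ∀ x ∈ M, pvKeep x = true) :
    pvFin (M.foldl pvStep (out, 2, run)) = out ++ M := by
  induction M generalizing out with
  | nil => simp [pvFin]
  | cons x xs ih =>
    have hx := hM x (by simp)
    have hstep : pvStep (out, 2, run) x = (out ++ [x], 2, run) := by simp [pvStep, hx]
    rw [List.foldl_cons, hstep, ih (out ++ [x]) (fun y hy => hM y (by simp [hy]))]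
    simp

theorem pvFold1 (M : List String) (out run : List String)
    (hM : ∀ x ∈ M, pvKeep x = true) :
    pvFin (M.foldl pvStep (out, 1, run)) = out ++ pvPost run M := by
  induction M generalizing out run with
  | nil => simp [pvFin, pvPost]
  | cons x xs ih =>
    have hx := hM x (by simp)
    have hxs : ∀ y ∈ xs, pvKeep y = true := fun y hy => hM y (by simp [hy])
    by_cases hb : pvBlank x = true
    · have hstep : pvStep (out, 1, run) x = (out, 1, run ++ [x]) := by simp [pvStep, hx, hb]
      rw [List.foldl_cons, hstep, ih out (run ++ [x]) hxs]
      simp [pvPost, hb]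
    · simp only [Bool.not_eq_true] at hb
      have hstep : pvStep (out, 1, run) x = (out ++ pvFlush run ++ [x], 2, []) := by
        simp [pvStep, hx, hb]
      rw [List.foldl_cons, hstep, pvFold2 xs _ _ hxs]
      simp [pvPost, hb]

theorem pvFold0 (M : List String) (out : List String)
    (hM : ∀ x ∈ M, pvKeep x = true) :
    pvFin (M.foldl pvStep (out, 0, [])) = out ++ pvACore (pvPop M) := by
  induction M generalizing out with
  | nil => simp [pvFin, pvPop, pvACore]
  | cons x xs ih =>
    have hx := hM x (by simp)
    have hxs : ∀ y ∈ xs, pvKeep y = true := fun y hy => hM y (by simp [hy])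
    by_cases hb : pvBlank x = true
    · have hstep : pvStep (out, 0, []) x = (out, 0, []) := by simp [pvStep, hx, hb]
      rw [List.foldl_cons, hstep, ih out hxs]
      simp [pvPop, hb]
    · simp only [Bool.not_eq_true] at hb
      by_cases hs : PySem.Str.startswith x "#" = true
      · have hs' : PySem.Chars.startswith x.toList ['#'] = true := by simpa using hs
        have hstep : pvStep (out, 0, []) x = (out ++ [x], 1, []) := by
          simp [pvStep, hx, hb, hs']
        rw [List.foldl_cons, hstep, pvFold1 xs _ _ hxs]
        simp [pvPop, pvACore, hb, hs']
      · simp only [Bool.not_eq_true] at hs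
        have hs' : PySem.Chars.startswith x.toList ['#'] = false := by simpa using hs
        have hstep : pvStep (out, 0, []) x = (out ++ [x], 2, []) := by
          simp [pvStep, hx, hb, hs']
        rw [List.foldl_cons, hstep, pvFold2 xs _ _ hxs]
        simp [pvPop, pvACore, hb, hs']

theorem pvPost_eq (M : List String) (run : List String) :
    pvPost run M = pvFlush (run ++ M.takeWhile pvBlank) ++ M.dropWhile pvBlank := by
  induction M generalizing run with
  | nil => simp [pvPost]
  | cons x xs ih =>
    by_cases hb : pvBlank x = true
    · simp [pvPost, hb, ih]
    · simp only [Bool.not_eq_true] at hb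
      simp [pvPost, hb]

theorem pvDrop_takeWhile (p : String → Bool) (l : List String) :
    l.drop (l.takeWhile p).length = l.dropWhile p := by
  induction l with
  | nil => rfl
  | cons x xs ih => by_cases h : p x = true <;> simp [h, ih]

theorem pvIdxScan_eq (M pre : List String) :
    pvIdxScan (pre ++ M) pre.length = pre.length + (M.takeWhile pvBlank).length := by
  induction M generalizing pre with
  | nil => rw [pvIdxScan]; simp
  | cons x xs ih =>
    rw [pvIdxScan]
    have hlt : pre.length < (pre ++ x :: xs).length := by simp
    have hget : (pre ++ x :: xs)[pre.length]'hlt = x := by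
      rw [List.getElem_append_right (le_refl _)]; simp
    by_cases hb : pvBlank x = true
    · have := ih (pre ++ [x])
      simp only [List.append_assoc, List.singleton_append, List.length_append,
        List.length_singleton] at this
      simp only [hlt, dif_pos, hget, hb, if_pos, this,
        List.takeWhile_cons_of_pos (p := pvBlank) hb]
      simp; omega
    · simp only [Bool.not_eq_true] at hb
      simp [hget, hb]

theorem pvACore_eq (lines : List String) :
    (match lines with
      | [] => ([] : List String)
      | l0 :: rest =>
        if PySem.Str.startswith l0 "#" then
          let idx := pvIdxScan (l0 :: rest) 1
          if idx > 2 then [l0, ""] ++ (l0 :: rest).drop idx else l0 :: rest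
        else l0 :: rest) = pvACore lines := by
  cases lines with
  | nil => rfl
  | cons l0 rest =>
    by_cases hs : PySem.Str.startswith l0 "#" = true
    · have hscan : pvIdxScan (l0 :: rest) 1 = 1 + (rest.takeWhile pvBlank).length := by
        simpa using pvIdxScan_eq rest [l0]
      have hdrop : (l0 :: rest).drop (1 + (rest.takeWhile pvBlank).length) =
          rest.dropWhile pvBlank := by
        rw [Nat.add_comm, List.drop_succ_cons, pvDrop_takeWhile]
      simp only [pvACore, hs, if_pos, hscan, hdrop, pvPost_eq, List.nil_append]
      by_cases ht1 : 1 < (rest.takeWhile pvBlank).length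
      · have hgt : 1 + (rest.takeWhile pvBlank).length > 2 := by omega
        simp [hgt, pvFlush, ht1]
      · have hgt : ¬ 1 + (rest.takeWhile pvBlank).length > 2 := by omega
        simp only [hgt, if_neg, not_false_iff, pvFlush, ht1]
        simp [List.takeWhile_append_dropWhile]
    · simp only [Bool.not_eq_true] at hs
      have hs' : PySem.Chars.startswith l0.toList ['#'] = false := by simpa using hs
      simp [pvACore, hs']

-- ===== VERDICT (by name: the statement is the Claim_ definition above) =====
theorem normalize_app_essence_spec : Claim_equal_normalize_app_essence := by
  intro text _
  show normalize_app_essence text = normalize_app_essence_alt text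
  have hB : normalize_app_essence_alt text =
      PySem.Str.strip (PySem.Str.join "\n"
        (pvFin ((PySem.Str.splitlines text).foldl pvStep ([], 0, [])))) := rfl
  have hM : ∀ x ∈ (PySem.Str.splitlines text).filter pvKeep, pvKeep x = true :=
    fun x hx => (List.mem_filter.mp hx).2
  rw [hB, pvFoldl_filter, pvFold0 _ [] hM]
  simp only [List.nil_append]
  unfold normalize_app_essence
  simp only []
  rw [pvACore_eq]
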